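-- pv_equiv track=rewrite | github.com/eriolchan/script | liveMonitor/metrics_collector.py | getRoleSet
-- ===== SOURCE A (Python) =====
-- def getRoleSet(batch):
--     sids = set()
--     hosts = set()
--     guests = set()
--     presents = set()
--     records = []
--
--     for item in batch:
--         id = item[0]
--         ts = item[1]
--         sid = item[2]
--         value = item[3]
--
--         sids.add(sid)
--         if id == 86:  # Video/High Send Resolution/Height
--             if value == 640:
--                 hosts.add(sid)
--             elif value == 160:
--                 guests.add(sid)
--         elif id == 140:  # Video Recv Render Freeze Count
--             records.append((id, ts, sid, value))
--         elif id == 83 and value:  # Video/High Send Bitrate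
--             presents.add(sid)
--             records.append((id, ts, sid, value))
--     return sids, hosts, guests, presents, records
-- ===== SOURCE B (Python) =====
-- def getRoleSet(batch):
--     sids = {item[2] for item in batch}
--     hosts = {item[2] for item in batch if item[0] == 86 and item[3] == 640}
--     guests = {item[2] for item in batch if item[0] == 86 and item[3] == 160}
--     presents = {item[2] for item in batch if item[0] == 83 and item[3]}
--     records = [item for item in batch
--                if item[0] == 140 or (item[0] == 83 and item[3])]
--     return sids, hosts, guests, presents, records
-- ===== Notes on version B (the rewrite author's own statement) =====
-- stated objective: idiomatic
-- what changed: Replaces the single stateful loop with five independent one-pass set/list comprehensions, one per returned component.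
import Mathlib
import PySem

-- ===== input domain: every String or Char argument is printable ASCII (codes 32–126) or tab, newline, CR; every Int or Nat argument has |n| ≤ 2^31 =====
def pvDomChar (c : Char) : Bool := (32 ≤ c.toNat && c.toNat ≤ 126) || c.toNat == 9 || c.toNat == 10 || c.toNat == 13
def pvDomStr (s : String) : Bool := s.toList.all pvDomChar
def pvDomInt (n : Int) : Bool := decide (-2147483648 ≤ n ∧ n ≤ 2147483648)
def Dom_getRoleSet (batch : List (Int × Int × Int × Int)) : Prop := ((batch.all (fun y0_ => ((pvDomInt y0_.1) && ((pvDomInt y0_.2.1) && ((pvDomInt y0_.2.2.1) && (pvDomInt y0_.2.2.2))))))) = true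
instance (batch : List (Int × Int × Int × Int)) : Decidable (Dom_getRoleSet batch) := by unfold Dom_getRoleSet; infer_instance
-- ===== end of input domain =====

-- B replaces A's single stateful loop by five independent one-pass comprehensions (idiomatic decomposition; same O(n) cost).
-- ===== PORT A =====
def getRoleSetStep
    (st : List Int × List Int × List Int × List Int × (List (Int × Int × Int × Int)))
    (item : Int × Int × Int × Int) :
    List Int × List Int × List Int × List Int × (List (Int × Int × Int × Int)) :=
  let id := item.1
  let ts := item.2.1
  let sid := item.2.2.1
  let value := item.2.2.2
  let sids := PySem.Set.add st.1 sid
  let hosts := st.2.1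
  let guests := st.2.2.1
  let presents := st.2.2.2.1
  let records := st.2.2.2.2
  if id = 86 then
    if value = 640 then (sids, PySem.Set.add hosts sid, guests, presents, records)
    else if value = 160 then (sids, hosts, PySem.Set.add guests sid, presents, records)
    else (sids, hosts, guests, presents, records)
  else if id = 140 then (sids, hosts, guests, presents, records ++ [(id, ts, sid, value)])
  else if id = 83 ∧ value ≠ 0 then
    (sids, hosts, guests, PySem.Set.add presents sid, records ++ [(id, ts, sid, value)])
  else (sids, hosts, guests, presents, records)

def getRoleSet (batch : List (Int × Int × Int × Int)) : List Int × List Int × List Int × List Int × (List (Int × Int × Int × Int)) :=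
  batch.foldl getRoleSetStep ([], [], [], [], [])

-- ===== PORT B =====
def getRoleSet_alt (batch : List (Int × Int × Int × Int)) : List Int × List Int × List Int × List Int × (List (Int × Int × Int × Int)) :=
  (PySem.Set.ofList (batch.map (fun item => item.2.2.1)),
   PySem.Set.ofList ((batch.filter (fun item => item.1 == 86 && item.2.2.2 == 640)).map (fun item => item.2.2.1)),
   PySem.Set.ofList ((batch.filter (fun item => item.1 == 86 && item.2.2.2 == 160)).map (fun item => item.2.2.1)),
   PySem.Set.ofList ((batch.filter (fun item => item.1 == 83 && item.2.2.2 != 0)).map (fun item => item.2.2.1)),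
   batch.filter (fun item => item.1 == 140 || (item.1 == 83 && item.2.2.2 != 0)))

-- ===== PRECONDITION & SPEC =====
def Spec_getRoleSet (batch : List (Int × Int × Int × Int)) (out : List Int × List Int × List Int × List Int × (List (Int × Int × Int × Int))) : Prop := out = getRoleSet_alt batch
instance (batch : List (Int × Int × Int × Int)) (out : List Int × List Int × List Int × List Int × (List (Int × Int × Int × Int))) : Decidable (Spec_getRoleSet batch out) := by
  unfold Spec_getRoleSet
  exact @instDecidableEqProd _ _ (by infer_instance)
    (@instDecidableEqProd _ _ (by infer_instance)
      (@instDecidableEqProd _ _ (by infer_instance)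
        (@instDecidableEqProd _ _ (by infer_instance) (by infer_instance)))) _ _

-- ===== CLAIM =====
def Claim_equal_getRoleSet : Prop := ∀ (batch : List (Int × Int × Int × Int)), Dom_getRoleSet batch → Spec_getRoleSet batch (getRoleSet batch)

-- ===== LEMMAS AND PROOFS =====
theorem getRoleSet_loop
    (batch : List (Int × Int × Int × Int))
    (s h g p : List Int) (r : List (Int × Int × Int × Int)) :
    batch.foldl getRoleSetStep (s, h, g, p, r) =
      (PySem.Set.update s (batch.map (fun item => item.2.2.1)),
       PySem.Set.update h (((batch.filter (fun item => item.1 == 86 && item.2.2.2 == 640)).map (fun item => item.2.2.1))),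
       PySem.Set.update g (((batch.filter (fun item => item.1 == 86 && item.2.2.2 == 160)).map (fun item => item.2.2.1))),
       PySem.Set.update p (((batch.filter (fun item => item.1 == 83 && item.2.2.2 != 0)).map (fun item => item.2.2.1))),
       r ++ batch.filter (fun item => item.1 == 140 || (item.1 == 83 && item.2.2.2 != 0))) := by
  induction batch generalizing s h g p r with
  | nil => simp [PySem.Set.update]
  | cons item rest ih =>
    obtain ⟨id, ts, sid, value⟩ := item
    simp only [List.foldl_cons, getRoleSetStep, List.map_cons, List.filter_cons]
    by_cases h86 : id = 86 <;> by_cases h640 : value = 640 <;> by_cases h160 : value = 160 <;>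
      by_cases h140 : id = 140 <;> by_cases h83 : id = 83 <;> by_cases hv : value = 0 <;>
      simp_all [PySem.Set.update]

-- ===== VERDICT =====
theorem getRoleSet_spec : Claim_equal_getRoleSet := by
  intro batch _
  unfold Spec_getRoleSet getRoleSet getRoleSet_alt
  rw [getRoleSet_loop]
  simp [PySem.Set.ofList_eq_foldl, PySem.Set.update]
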